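-- pv_equiv track=rewrite | github.com/Morgan-Ngetich/crackmode | frontend/scripts/convert_to_lazy.py | extract_component_code
-- ===== SOURCE A (Python) =====
-- def extract_component_code(content: str) -> str:
--     """Extract component definition and helper code."""
--     lines = content.split('\n')
--     component_lines = []
--     in_component = False
--     skip_import = True
--
--     for i, line in enumerate(lines):
--         # Skip imports at the start
--         if skip_import:
--             if line.strip().startswith('import') or not line.strip():
--                 continue
--             skip_import = False
--
--         # Stop at export const Route
--         if 'export const Route' in line:
--             break
--
--         # Capture everything else (component definitions, functions, etc.)
--         if line.strip():
--             component_lines.append(line)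
--
--     return '\n'.join(component_lines)
-- ===== SOURCE B (Python) =====
-- def extract_component_code(content: str) -> str:
--     """Extract component definition and helper code."""
--     lines = content.split('\n')
--     start = next((i for i, l in enumerate(lines)
--                   if l.strip() and not l.strip().startswith('import')), len(lines))
--     tail = lines[start:]
--     stop = next((i for i, l in enumerate(tail)
--                  if 'export const Route' in l), len(tail))
--     return '\n'.join(l for l in tail[:stop] if l.strip())
-- ===== Notes on version B (the rewrite author's own statement) =====
-- stated objective: idiomatic
-- what changed: Replaces the single loop with skip_import/in_component flags and a break by a three-phase pipeline: find the end of the leading blank/import prefix, find the Route-export cut-off in the tail, then filter-and-join the blank-free slice between them.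
import Mathlib
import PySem

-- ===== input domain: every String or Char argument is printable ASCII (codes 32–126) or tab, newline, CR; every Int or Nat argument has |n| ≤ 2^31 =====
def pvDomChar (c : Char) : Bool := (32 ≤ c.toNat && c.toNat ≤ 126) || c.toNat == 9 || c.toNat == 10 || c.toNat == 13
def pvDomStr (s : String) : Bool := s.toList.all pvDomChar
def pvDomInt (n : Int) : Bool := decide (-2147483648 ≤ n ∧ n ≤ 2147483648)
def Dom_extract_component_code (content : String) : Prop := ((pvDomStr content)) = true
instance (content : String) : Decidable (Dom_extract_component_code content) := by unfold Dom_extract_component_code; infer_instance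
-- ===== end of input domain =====

-- B replaces A's flag-driven single loop by an index/slice pipeline (prefix cut, Route cut, filter-join); objective: idiomatic.

-- the three line tests both Pythons write inline:
def eccBlank (l : String) : Bool := PySem.Str.strip l == ""                              -- not line.strip()
def eccImport (l : String) : Bool := PySem.Str.startswith (PySem.Str.strip l) "import"   -- line.strip().startswith('import')
def eccRoute (l : String) : Bool := PySem.Str.isIn "export const Route" l                -- 'export const Route' in line

-- ===== PORT A =====
-- A's loop with its skip_import flag; A's `in_component` is assigned and never read, so it is omitted
def eccLoop (lines : List String) (acc : List String) (skip : Bool) : List String :=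
  match lines with
  | [] => acc
  | l :: rest =>
    if skip && (eccImport l || eccBlank l) then
      eccLoop rest acc skip
    else if eccRoute l then
      acc
    else if eccBlank l then
      eccLoop rest acc false
    else
      eccLoop rest (acc ++ [l]) false

def extract_component_code (content : String) : String :=
  -- content.split('\n'): the separator "\n" is nonempty, so split? is always some
  PySem.Str.join "\n" (eccLoop ((PySem.Str.split? content "\n").getD []) [] true)

-- ===== PORT B =====
def extract_component_code_alt (content : String) : String :=
  let lines := (PySem.Str.split? content "\n").getD []   -- sep "\n" ≠ "": always some
  let start := lines.findIdx (fun l => !eccBlank l && !eccImport l)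
  let tail := lines.drop start
  let stop := tail.findIdx (fun l => eccRoute l)
  PySem.Str.join "\n" ((tail.take stop).filter (fun l => !eccBlank l))

-- ===== PRECONDITION & SPEC =====
def Spec_extract_component_code (content : String) (out : String) : Prop := out = extract_component_code_alt content
instance (content : String) (out : String) : Decidable (Spec_extract_component_code content out) := by unfold Spec_extract_component_code; infer_instance

-- ===== CLAIM (what is proved, stated in full; the proofs are below) =====
def Claim_equal_extract_component_code : Prop := ∀ (content : String), Dom_extract_component_code content → Spec_extract_component_code content (extract_component_code content)

-- ===== LEMMAS AND PROOFS =====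

-- B's start-predicate is the negation of A's skip-phase test
theorem ecc_q_eq_not_p (l : String) :
    (!eccBlank l && !eccImport l) = !(eccImport l || eccBlank l) := by
  cases eccBlank l <;> cases eccImport l <;> rfl

-- dropping up to the first index where ¬p holds is dropWhile p
theorem drop_findIdx_not_eq_dropWhile {α : Type} (p : α → Bool) (l : List α) :
    l.drop (l.findIdx (fun x => !p x)) = l.dropWhile p := by
  induction l with
  | nil => rfl
  | cons h t ih =>
    by_cases hp : p h = true
    · simp [List.findIdx_cons, hp, ih]
    · simp at hp
      simp [List.findIdx_cons, hp]

-- taking up to the first index where r holds is takeWhile ¬r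
theorem take_findIdx_eq_takeWhile {α : Type} (r : α → Bool) (l : List α) :
    l.take (l.findIdx r) = l.takeWhile (fun x => !r x) := by
  induction l with
  | nil => rfl
  | cons h t ih =>
    by_cases hr : r h = true
    · simp [List.findIdx_cons, hr]
    · simp at hr
      simp [List.findIdx_cons, hr, ih]

-- skip phase: running with skip = true first discards the import/blank prefix
theorem eccLoop_true_eq (lines acc : List String) :
    eccLoop lines acc true = eccLoop (lines.dropWhile (fun l => eccImport l || eccBlank l)) acc false := by
  induction lines with
  | nil => rfl
  | cons l rest ih =>
    by_cases hp : (eccImport l || eccBlank l) = true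
    · rw [List.dropWhile_cons_of_pos (p := fun l => eccImport l || eccBlank l) hp, ← ih]
      simp [eccLoop, hp]
    · rw [List.dropWhile_cons_of_neg (p := fun l => eccImport l || eccBlank l) hp]
      simp at hp
      simp [eccLoop, hp.1, hp.2]

-- main phase: with skip = false the loop is filter-after-takeWhile
theorem eccLoop_false_eq (lines acc : List String) :
    eccLoop lines acc false =
      acc ++ (lines.takeWhile (fun l => !eccRoute l)).filter (fun l => !eccBlank l) := by
  induction lines generalizing acc with
  | nil => simp [eccLoop]
  | cons l rest ih =>
    by_cases hr : eccRoute l = true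
    · simp [eccLoop, hr]
    · simp at hr
      by_cases hb : eccBlank l = true
      · simp [eccLoop, hr, hb, ih]
      · simp at hb
        simp [eccLoop, hr, hb, ih]

-- ===== VERDICT (by name: the statement is the Claim_ definition above) =====
theorem extract_component_code_spec : Claim_equal_extract_component_code := by
  intro content _
  unfold Spec_extract_component_code extract_component_code extract_component_code_alt
  rw [eccLoop_true_eq, eccLoop_false_eq]
  congr 1
  rw [List.nil_append]
  have hq : (fun l => !eccBlank l && !eccImport l) = (fun l => !(eccImport l || eccBlank l)) :=
    funext ecc_q_eq_not_p
  rw [hq, drop_findIdx_not_eq_dropWhile, take_findIdx_eq_takeWhile]
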